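-- pv_equiv track=rewrite | github.com/petite-etoile/AtCoder | tenka/2012/yosenB/B.py | is_camel
-- ===== SOURCE A (Python) =====
-- def is_camel(S):
--     if(S[0].isupper()):
--         return False
--     S=list(S)
--     last = 0
--     for i,s in enumerate(S):
--         s=S[i]
--         if(s.isupper()):
--             S[i]=s.lower()
--             if(S[last:i+1]):
--                 if(not is_word(S[last:i+1])):
--                     return False
--     if(not is_word(S[last:])):
--         return False
--     return True
--
-- def is_word(S):
--     #_がない, 数字で始まらない, 小文字
--     if(S.count("_")):
--         return False
--     if(not S):
--         return False
--     try:
--         int(S[0])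
--         return False
--     except:
--         for s in S[1:]:
--             if(s.isupper()):
--                 return False
--         return True
-- ===== SOURCE B (Python) =====
-- def is_camel(S):
--     c = S[0]                 # raises IndexError on empty, like A
--     if c.isupper():
--         return False
--     try:
--         int(c)
--         return False
--     except ValueError:
--         pass
--     return '_' not in S
-- ===== Notes on version B (the rewrite author's own statement) =====
-- stated objective: simpler
-- what changed: A's per-character loop with in-place lowercasing, prefix slicing and repeated is_word calls collapses to one direct test: S[0] not uppercase, int(S[0]) fails, and '_' not in S.
import Mathlib
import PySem

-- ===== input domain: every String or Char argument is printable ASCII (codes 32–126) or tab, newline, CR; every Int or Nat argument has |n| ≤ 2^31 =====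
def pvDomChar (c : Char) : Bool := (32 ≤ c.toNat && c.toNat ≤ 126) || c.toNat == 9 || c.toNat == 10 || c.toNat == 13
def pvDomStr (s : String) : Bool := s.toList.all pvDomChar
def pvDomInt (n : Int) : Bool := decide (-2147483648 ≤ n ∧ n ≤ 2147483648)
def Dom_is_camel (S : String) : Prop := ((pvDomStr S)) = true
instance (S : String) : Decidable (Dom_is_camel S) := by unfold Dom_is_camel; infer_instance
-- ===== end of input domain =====

-- B replaces A's char-by-char loop with its in-place lowering and repeated prefix is_word
-- checks by one direct test of three conditions on the string; objective: simpler.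

-- ===== PORT A =====
-- is_word(S) where S is a list of 1-char strings (here: List Char)
def pvIsWordA (S : List Char) : Bool :=
  if PySem.List.count S '_' ≠ 0 then false
  else match S with
  | [] => false                    -- if(not S): return False
  | c :: rest =>
    -- try: int(S[0]); return False / except: loop over S[1:]
    if (PySem.Int.ofChars? [c]).isSome then false
    else rest.all (fun s => !PySem.Chars.isupper s)

-- the for-loop over enumerate(S) with the in-place list mutation (last stays 0)
def pvLoopA (T : List Char) (i : Nat) : Bool :=
  if h : i < T.length then
    let s := T[i]
    if PySem.Chars.isupper s then
      let T' := T.set i (PySem.Chars.lowerChar s)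
      if PySem.List.slice T' (some 0) (some ((i : Int) + 1)) ≠ [] then
        if !pvIsWordA (PySem.List.slice T' (some 0) (some ((i : Int) + 1))) then false
        else pvLoopA T' (i + 1)
      else pvLoopA T' (i + 1)
    else pvLoopA T (i + 1)
  else
    -- if(not is_word(S[last:])): return False ; return True   (last = 0)
    if !pvIsWordA (PySem.List.slice T (some 0) none) then false else true
termination_by T.length - i
decreasing_by all_goals (try simp only [List.length_set]); omega

def is_camel (S : String) : Bool :=
  match PySem.Str.pyGet? S 0 with
  | none => false          -- S[0] raises IndexError in Python: excluded by Pre_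
  | some c =>
    if PySem.Chars.isupper c then false
    else pvLoopA S.toList 0

-- ===== PORT B =====
def is_camel_alt (S : String) : Bool :=
  match PySem.Str.pyGet? S 0 with
  | none => false          -- S[0] raises IndexError in Python: excluded by Pre_
  | some c =>
    if PySem.Chars.isupper c then false
    else if (PySem.Int.ofChars? [c]).isSome then false
    else !PySem.Str.isIn "_" S

-- ===== PRECONDITION & SPEC =====
-- Pre_ excludes only the empty string, on which A (and B) raise IndexError at S[0].
def Pre_is_camel (S : String) : Prop := S ≠ ""
instance (S : String) : Decidable (Pre_is_camel S) := by unfold Pre_is_camel; infer_instance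
def pvWitness_is_camel : String := "aBc"

def Spec_is_camel (S : String) (out : Bool) : Prop := out = is_camel_alt S
instance (S : String) (out : Bool) : Decidable (Spec_is_camel S out) := by unfold Spec_is_camel; infer_instance

-- ===== CLAIM (what is proved, stated in full; the proofs are below) =====
def Claim_equal_is_camel : Prop := ∀ (S : String), Dom_is_camel S → Pre_is_camel S → Spec_is_camel S (is_camel S)

-- ===== LEMMAS AND PROOFS =====

theorem up_range (c : Char) (h : PySem.Chars.isupper c = true) : 65 ≤ c.toNat ∧ c.toNat ≤ 90 := by
  unfold PySem.Chars.isupper at h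
  simp only [Bool.and_eq_true, decide_eq_true_eq, Char.le_def, UInt32.le_iff_toNat_le] at h
  exact h

theorem lower_toNat (c : Char) (h : PySem.Chars.isupper c = true) :
    (PySem.Chars.lowerChar c).toNat = c.toNat + 32 := by
  obtain ⟨h1, h2⟩ := up_range c h
  unfold PySem.Chars.lowerChar
  rw [if_pos h, Char.toNat_ofNat, if_pos]
  left; omega

theorem underscore_toNat : ('_' : Char).toNat = 95 := rfl

theorem lower_ne (c : Char) (h : PySem.Chars.isupper c = true) : PySem.Chars.lowerChar c ≠ '_' := by
  intro he
  have ht := lower_toNat c h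
  obtain ⟨h1, h2⟩ := up_range c h
  rw [he, underscore_toNat] at ht
  omega

theorem isupper_lower (c : Char) (h : PySem.Chars.isupper c = true) :
    PySem.Chars.isupper (PySem.Chars.lowerChar c) = false := by
  have ht := lower_toNat c h
  obtain ⟨h1, h2⟩ := up_range c h
  unfold PySem.Chars.isupper
  have hz : ¬ (PySem.Chars.lowerChar c ≤ 'Z') := by
    intro hle
    rw [Char.le_def, UInt32.le_iff_toNat_le] at hle
    have e1 : (PySem.Chars.lowerChar c).val.toNat = (PySem.Chars.lowerChar c).toNat := rfl
    have e2 : ('Z' : Char).val.toNat = 90 := rfl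
    omega
  rw [decide_eq_false hz, Bool.and_false]

theorem upper_ne_us (c : Char) (h : PySem.Chars.isupper c = true) : c ≠ '_' := by
  intro he
  obtain ⟨h1, h2⟩ := up_range c h
  rw [he, underscore_toNat] at h2
  omega

theorem mem_set_iff (l : List Char) (i : Nat) (hi : i < l.length) (x v : Char)
    (hold : l[i] ≠ v) (hnew : x ≠ v) : v ∈ l.set i x ↔ v ∈ l := by
  constructor
  · intro h
    obtain ⟨j, hj, hjv⟩ := List.mem_iff_getElem.mp h
    rw [List.getElem_set] at hjv
    by_cases hji : i = j
    · exact absurd hjv (by simp [hji, hnew])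
    · rw [if_neg hji] at hjv
      exact List.mem_iff_getElem.mpr ⟨j, by simpa using hj, hjv⟩
  · intro h
    obtain ⟨j, hj, hjv⟩ := List.mem_iff_getElem.mp h
    have hji : i ≠ j := by intro he; subst he; exact hold hjv
    refine List.mem_iff_getElem.mpr ⟨j, by simpa using hj, ?_⟩
    rw [List.getElem_set, if_neg hji]
    exact hjv

-- the contraction of is_word on a nonempty all-lowered-tail list
theorem pvIsWordA_eq (c : Char) (rest : List Char)
    (hlow : ∀ j (hj : j < rest.length), PySem.Chars.isupper rest[j] = false) :
    pvIsWordA (c :: rest) = (!((c :: rest).contains '_') && !(PySem.Int.ofChars? [c]).isSome) := by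
  unfold pvIsWordA
  by_cases hc : '_' ∈ (c :: rest)
  · rw [if_pos (by simp only [ne_eq, PySem.List.count, List.count_eq_zero, not_not]; exact hc)]
    simp [hc]
  · rw [if_neg (by simp only [ne_eq, PySem.List.count, List.count_eq_zero, not_not]; exact hc)]
    have hcont : (c :: rest).contains '_' = false := by simpa using hc
    rw [hcont]
    cases hs : (PySem.Int.ofChars? [c]).isSome
    · simp only [hs, Bool.false_eq_true, if_false, Bool.not_false, Bool.true_and]
      rw [List.all_eq_true]
      intro x hx
      obtain ⟨j, hj, rfl⟩ := List.mem_iff_getElem.mp hx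
      simp [hlow j hj]
    · simp [hs]

-- the contraction of A's loop: from state T (first char and the first i chars not upper),
-- the loop computes "no '_' anywhere and the first char is not int()-parsable"
theorem pvLoopA_eq (n : Nat) : ∀ (c : Char) (rest : List Char) (i : Nat),
    (c :: rest).length - i = n →
    PySem.Chars.isupper c = false →
    (∀ j (hj : j < rest.length), j + 1 < i → PySem.Chars.isupper rest[j] = false) →
    pvLoopA (c :: rest) i
      = (!((c :: rest).contains '_') && !(PySem.Int.ofChars? [c]).isSome) := by
  induction n with
  | zero =>
    intro c rest i hn hc hlow
    have hge : ¬ i < (c :: rest).length := by omega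
    rw [pvLoopA, dif_neg hge]
    rw [PySem.List.slice_zero_start, PySem.List.slice_none_none]
    rw [pvIsWordA_eq c rest (fun j hj => hlow j hj (by simp at hge; omega))]
    cases ((c :: rest).contains '_') <;> cases (PySem.Int.ofChars? [c]).isSome <;> simp
  | succ n ih =>
    intro c rest i hn hc hlow
    have hlt : i < (c :: rest).length := by omega
    rw [pvLoopA, dif_pos hlt]
    simp only
    by_cases hup : PySem.Chars.isupper (c :: rest)[i] = true
    · rw [if_pos hup]
      match i, hlt with
      | 0, _ => exact absurd hup (by simpa [hc])
      | (k + 1), hlt =>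
        have hk : k < rest.length := by simpa using hlt
        have hget : (c :: rest)[k + 1] = rest[k] := by simp
        rw [hget] at hup
        have hset : (c :: rest).set (k + 1) (PySem.Chars.lowerChar (c :: rest)[k + 1])
            = c :: rest.set k (PySem.Chars.lowerChar rest[k]) := by simp
        rw [hset]
        have hcast : ((k + 1 : Nat) : Int) + 1 = ((k + 2 : Nat) : Int) := by push_cast; ring
        rw [hcast, PySem.List.slice_zero_start, PySem.List.slice_to_natCast]
        have htake : (c :: rest.set k (PySem.Chars.lowerChar rest[k])).take (k + 2)
            = c :: (rest.set k (PySem.Chars.lowerChar rest[k])).take (k + 1) := by simp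
        rw [htake]
        have hne : (c :: (rest.set k (PySem.Chars.lowerChar rest[k])).take (k + 1)) ≠ [] := by simp
        rw [if_pos hne]
        -- every char of the set-list is non-upper up to position k
        have hlow' : ∀ j (hj : j < (rest.set k (PySem.Chars.lowerChar rest[k])).length),
            j + 1 < k + 2 → PySem.Chars.isupper (rest.set k (PySem.Chars.lowerChar rest[k]))[j] = false := by
          intro j hj hjk
          rw [List.getElem_set]
          by_cases hkj : k = j
          · rw [if_pos hkj]; exact isupper_lower _ hup
          · rw [if_neg hkj]
            have hjr : j < rest.length := by simpa using hj
            have hjk1 : j + 1 < k + 1 := by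
              rcases Nat.lt_trichotomy j k with h | h | h
              · omega
              · exact absurd h.symm hkj
              · omega
            exact hlow j hjr hjk1
        have hlowtake : ∀ j (hj : j < ((rest.set k (PySem.Chars.lowerChar rest[k])).take (k + 1)).length),
            PySem.Chars.isupper ((rest.set k (PySem.Chars.lowerChar rest[k])).take (k + 1))[j] = false := by
          intro j hj
          have hj2 : j < (rest.set k (PySem.Chars.lowerChar rest[k])).length := by
            simp only [List.length_take] at hj
            omega
          have hj' : j < k + 1 := by
            simp only [List.length_take] at hj
            omega
          rw [List.getElem_take]
          exact hlow' j hj2 (by omega)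
        rw [pvIsWordA_eq c _ hlowtake]
        -- '_'-membership is unchanged by the set (old char upper, new char a lowered upper)
        have hmem : '_' ∈ rest.set k (PySem.Chars.lowerChar rest[k]) ↔ '_' ∈ rest := by
          have := mem_set_iff rest k hk (PySem.Chars.lowerChar rest[k]) '_'
            (upper_ne_us _ hup) (lower_ne _ hup)
          simpa using this
        by_cases hpre : ('_' ∈ c :: (rest.set k (PySem.Chars.lowerChar rest[k])).take (k + 1))
          ∨ (PySem.Int.ofChars? [c]).isSome = true
        · -- the prefix check fails; both sides are false
          have hw : (!((c :: (rest.set k (PySem.Chars.lowerChar rest[k])).take (k + 1)).contains '_')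
              && !(PySem.Int.ofChars? [c]).isSome) = false := by
            rcases hpre with h | h
            · simp [h]
            · simp [h]
          rw [hw]
          simp only [Bool.not_false, if_true]
          have hrhs : (!((c :: rest).contains '_') && !(PySem.Int.ofChars? [c]).isSome) = false := by
            rcases hpre with h | h
            · have : '_' ∈ c :: rest := by
                rcases List.mem_cons.mp h with h0 | h1
                · exact List.mem_cons.mpr (Or.inl h0)
                · have : '_' ∈ rest.set k (PySem.Chars.lowerChar rest[k]) :=
                    List.mem_of_mem_take h1
                  exact List.mem_cons.mpr (Or.inr (hmem.mp this))
              simp [this]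
            · simp [h]
          rw [hrhs]
        · -- the prefix check passes; recurse via the induction hypothesis
          push Not at hpre
          obtain ⟨hp1, hp2⟩ := hpre
          have hcontf : ((c :: (rest.set k (PySem.Chars.lowerChar rest[k])).take (k + 1)).contains '_') = false := by
            rw [Bool.eq_false_iff]
            intro hh
            exact hp1 (by simpa using hh)
          have hs0 : (PySem.Int.ofChars? [c]).isSome = false := Bool.eq_false_iff.mpr hp2
          have hw : (!((c :: (rest.set k (PySem.Chars.lowerChar rest[k])).take (k + 1)).contains '_')
              && !(PySem.Int.ofChars? [c]).isSome) = true := by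
            rw [hcontf, hs0]
            rfl
          rw [hw]
          simp only [Bool.not_true, Bool.false_eq_true, if_false]
          rw [ih c (rest.set k (PySem.Chars.lowerChar rest[k])) (k + 2)
            (by simp at hn ⊢; omega) hc
            (fun j hj hjk => hlow' j hj (by omega))]
          have hcc : ((c :: rest.set k (PySem.Chars.lowerChar rest[k])).contains '_')
              = ((c :: rest).contains '_') := by
            by_cases h : '_' ∈ c :: rest
            · have : '_' ∈ c :: rest.set k (PySem.Chars.lowerChar rest[k]) := by
                rcases List.mem_cons.mp h with h0 | h1
                · exact List.mem_cons.mpr (Or.inl h0)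
                · exact List.mem_cons.mpr (Or.inr (hmem.mpr h1))
              simp [this, h]
            · have h2 : ¬ ('_' ∈ c :: rest.set k (PySem.Chars.lowerChar rest[k])) := by
                intro hmem2
                rcases List.mem_cons.mp hmem2 with h0 | h1
                · exact h (List.mem_cons.mpr (Or.inl h0))
                · exact h (List.mem_cons.mpr (Or.inr (hmem.mp h1)))
              simp [h, h2]
          rw [hcc]
    · rw [if_neg hup]
      exact ih c rest (i + 1) (by simp at hn ⊢; omega) hc
        (fun j hj hjk => by
          by_cases hji : j + 1 = i
          · have : (c :: rest)[i] = rest[j] := by subst hji; simp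
            rw [this] at hup
            exact Bool.eq_false_iff.mpr hup
          · exact hlow j hj (by omega))

theorem singleton_infix_iff (c : Char) (L : List Char) : [c] <:+: L ↔ c ∈ L := by
  constructor
  · intro h; exact h.subset (List.mem_singleton_self c)
  · intro h
    obtain ⟨a, b, rfl⟩ := List.append_of_mem h
    exact ⟨a, b, by simp⟩

theorem isIn_underscore (S : String) :
    PySem.Str.isIn "_" S = S.toList.contains '_' := by
  by_cases h : '_' ∈ S.toList
  · have h1 : PySem.Chars.isIn ['_'] S.toList = true :=
      (PySem.Chars.isIn_iff_infix _ _).mpr ((singleton_infix_iff _ _).mpr h)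
    simp [h1, h]
  · have h1 : PySem.Chars.isIn ['_'] S.toList = false :=
      (PySem.Chars.isIn_eq_false_iff _ _).mpr (fun hinf => h ((singleton_infix_iff _ _).mp hinf))
    simp [h1, h]

-- ===== VERDICT (by name: the statement is the Claim_ definition above) =====
theorem is_camel_spec : Claim_equal_is_camel := by
  intro S _ hpre
  unfold Spec_is_camel is_camel is_camel_alt
  obtain ⟨c, rest, hl⟩ : ∃ c rest, S.toList = c :: rest := by
    cases hS : S.toList with
    | nil => exact absurd (by simpa using congrArg String.ofList hS) hpre
    | cons c rest => exact ⟨c, rest, rfl⟩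
  have hget : PySem.Str.pyGet? S 0 = some c := by
    simp [PySem.Str.pyGet?_eq, hl]
  rw [hget]
  simp only
  cases hup : PySem.Chars.isupper c
  · simp only [Bool.false_eq_true, if_false]
    rw [hl, pvLoopA_eq ((c :: rest).length) c rest 0 (by omega) hup (by omega)]
    rw [isIn_underscore, hl]
    cases hs : (PySem.Int.ofChars? [c]).isSome
    · simp
    · simp
  · simp
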